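-- pv_equiv track=rewrite | github.com/apoorvar5/Decipher_Columnar_Shift_and_Transposition_Shift | decrypt.py | sort_map
-- ===== SOURCE A (Python) =====
-- def sort_map(frequency_map):
--     key_list = []
--     max_val = max(frequency_map.values())
--     for max_value in range(max_val, -1, -1):
--         for aplha_char in frequency_map.keys():
--             if frequency_map[aplha_char] == max_value:
--                 key_list.append(aplha_char)
--     return key_list
-- ===== SOURCE B (Python) =====
-- def sort_map(frequency_map):
--     max_val = max(frequency_map.values())
--     buckets = {}
--     for k, v in frequency_map.items():
--         buckets.setdefault(v, []).append(k)
--     out = []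
--     for v in range(max_val, -1, -1):
--         out.extend(buckets.get(v, []))
--     return out
-- ===== Notes on version B (the rewrite author's own statement) =====
-- stated objective: alternative
-- what changed: One grouping pass builds value->keys buckets, then a single descending walk over the value range concatenates them, replacing A's full rescan of the dict for every value in range(max_val, -1, -1).
import Mathlib
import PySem

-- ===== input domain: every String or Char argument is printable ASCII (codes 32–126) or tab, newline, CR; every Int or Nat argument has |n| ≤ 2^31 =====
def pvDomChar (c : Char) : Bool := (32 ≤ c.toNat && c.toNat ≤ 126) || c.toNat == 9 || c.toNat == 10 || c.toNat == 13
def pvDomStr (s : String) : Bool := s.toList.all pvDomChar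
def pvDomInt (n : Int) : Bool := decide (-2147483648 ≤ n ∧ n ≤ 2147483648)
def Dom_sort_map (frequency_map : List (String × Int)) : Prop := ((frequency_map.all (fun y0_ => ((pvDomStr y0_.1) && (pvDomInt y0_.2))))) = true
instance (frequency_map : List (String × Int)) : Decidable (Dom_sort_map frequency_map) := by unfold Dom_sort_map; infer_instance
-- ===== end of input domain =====

-- B replaces A's rescan of the whole dict for every value in range(max_val, -1, -1)
-- by one grouping pass into value->keys buckets and a single descending walk (alternative
-- algorithm; same measured cost on the generated inputs).


-- ===== PORT A =====
def sort_map (frequency_map : List (String × Int)) : List String :=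
  let d := PySem.Dict.mk frequency_map
  match PySem.List.max? d.values id with
  | none => []   -- unreachable under Pre_: Python's max raises ValueError on an empty dict
  | some max_val =>
    (PySem.List.pyRange max_val (-1) (-1)).foldl
      (fun key_list max_value =>
        d.keys.foldl
          (fun key_list aplha_char =>
            if d.getD aplha_char 0 == max_value then key_list ++ [aplha_char] else key_list)
          key_list)
      []

-- ===== PORT B =====
def sort_map_alt (frequency_map : List (String × Int)) : List String :=
  let d := PySem.Dict.mk frequency_map
  match PySem.List.max? d.values id with
  | none => []   -- unreachable under Pre_: Python's max raises ValueError on an empty dict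
  | some max_val =>
    -- buckets[v] = buckets.get(v, []) + [k]  is exactly Dict.modify v [] (· ++ [k])
    let buckets : PySem.Dict Int (List String) :=
      d.items.foldl (fun b kv => b.modify kv.2 [] (· ++ [kv.1])) PySem.Dict.empty
    (PySem.List.pyRange max_val (-1) (-1)).foldl
      (fun out v => out ++ buckets.getD v []) []

-- ===== PRECONDITION & SPEC =====
-- Pre_ excludes the empty map, where both Pythons raise ValueError (max of an empty
-- sequence), and association lists with duplicate keys, which do not correspond to any
-- Python dict input (a dict cannot hold a key twice).
def Pre_sort_map (frequency_map : List (String × Int)) : Prop :=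
  frequency_map ≠ [] ∧ (frequency_map.map Prod.fst).Nodup
instance (frequency_map : List (String × Int)) : Decidable (Pre_sort_map frequency_map) := by unfold Pre_sort_map; infer_instance
def pvWitness_sort_map : (List (String × Int)) := [("a", 2), ("b", 0), ("c", 2)]
def Spec_sort_map (frequency_map : List (String × Int)) (out : List String) : Prop := out = sort_map_alt frequency_map
instance (frequency_map : List (String × Int)) (out : List String) : Decidable (Spec_sort_map frequency_map out) := by unfold Spec_sort_map; infer_instance

-- ===== CLAIM (what is proved, stated in full; the proofs are below) =====
def Claim_equal_sort_map : Prop := ∀ (frequency_map : List (String × Int)), Dom_sort_map frequency_map → Pre_sort_map frequency_map → Spec_sort_map frequency_map (sort_map frequency_map)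

-- ===== LEMMAS AND PROOFS =====

-- Filtering a map's keys by a function that agrees with the stored values equals
-- projecting the pairs filtered by value (specific to how A scans keys vs B groups pairs).
lemma pv_keys_filter_eq (l : List (String × Int)) (g : String → Int) (v : Int)
    (h : ∀ p ∈ l, g p.1 = p.2) :
    (l.map (fun p => p.1)).filter (fun k => g k == v)
      = (l.filter (fun p => p.2 == v)).map (fun p => p.1) := by
  induction l with
  | nil => simp
  | cons p rest ih =>
    have hp : g p.1 = p.2 := h p (List.mem_cons_self)
    have hrest : ∀ q ∈ rest, g q.1 = q.2 := fun q hq => h q (List.mem_cons_of_mem _ hq)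
    simp only [List.map_cons, List.filter_cons, hp, ih hrest]
    split <;> simp

-- B's bucket lookup returns exactly the keys of the pairs carrying value v, in order.
lemma pv_buckets_getD (l : List (String × Int)) (v : Int) :
    ((l.foldl (fun b kv => b.modify kv.2 [] (· ++ [kv.1]))
        (PySem.Dict.empty : PySem.Dict Int (List String))).getD v [])
      = (l.filter (fun kv => kv.2 == v)).map (fun kv => kv.1) := by
  have := PySem.Dict.getD_foldl_modify_append
      (l.map (fun kv => (kv.2, kv.1))) (PySem.Dict.empty : PySem.Dict Int (List String)) v
  rw [List.foldl_map] at this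
  simpa [List.filter_map, Function.comp] using this

-- ===== VERDICT (by name: the statement is the Claim_ definition above) =====
theorem sort_map_spec : Claim_equal_sort_map := by
  intro fm _hdom hpre
  unfold Spec_sort_map sort_map sort_map_alt
  cases hmax : PySem.List.max? (PySem.Dict.mk fm).values id with
  | none => simp only [hmax]
  | some max_val =>
    simp only [hmax]
    apply PySem.List.foldl_congr_mem
    intro acc v _hv
    rw [PySem.List.foldl_append_if_eq_filter
        (fun k => (PySem.Dict.mk fm).getD k 0 == v) (PySem.Dict.mk fm).keys acc]
    rw [pv_buckets_getD]
    congr 1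
    have hnd : (PySem.Dict.mk fm).keys.Nodup := by
      simpa [PySem.Dict.keys_mk] using hpre.2
    have hval : ∀ p ∈ fm, (PySem.Dict.mk fm).getD p.1 0 = p.2 := by
      intro p hp
      exact PySem.Dict.getD_of_mem_items (d := PySem.Dict.mk fm) (k := p.1) (v := p.2) hp hnd 0
    simpa [PySem.Dict.keys_mk] using
      pv_keys_filter_eq fm (fun k => (PySem.Dict.mk fm).getD k 0) v hval
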